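-- pv_equiv track=rewrite | github.com/marcwempe/SlideQuest | src/slidequest/app.py | _images_to_content
-- ===== SOURCE A (Python) =====
-- def _images_to_content(layout_id: str, images: dict[int, str]) -> list[str]:
--     if not images:
--         return []
--     max_area = max((area_id for area_id in images.keys() if area_id > 0), default=0)
--     if max_area <= 0:
--         return []
--     content = ["" for _ in range(max_area)]
--     for area_id, path in images.items():
--         if area_id <= 0 or not path:
--             continue
--         index = area_id - 1
--         if index >= len(content):
--             content.extend([""] * (index + 1 - len(content)))
--         content[index] = path
--     return content
-- ===== SOURCE B (Python) =====
-- def _images_to_content(layout_id: str, images: dict[int, str]) -> list[str]: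
--     if not images:
--         return []
--     max_area = max((k for k in images.keys() if k > 0), default=0)
--     if max_area <= 0:
--         return []
--     return [images.get(i, "") for i in range(1, max_area + 1)]
-- ===== Notes on version B (the rewrite author's own statement) =====
-- stated objective: simpler
-- what changed: Builds the result by gathering (a comprehension over positions 1..max_area reading images.get(i, '')) instead of scattering dict items into a pre-sized mutable list, dropping the dead extend branch and the in-place index writes.
import Mathlib
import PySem

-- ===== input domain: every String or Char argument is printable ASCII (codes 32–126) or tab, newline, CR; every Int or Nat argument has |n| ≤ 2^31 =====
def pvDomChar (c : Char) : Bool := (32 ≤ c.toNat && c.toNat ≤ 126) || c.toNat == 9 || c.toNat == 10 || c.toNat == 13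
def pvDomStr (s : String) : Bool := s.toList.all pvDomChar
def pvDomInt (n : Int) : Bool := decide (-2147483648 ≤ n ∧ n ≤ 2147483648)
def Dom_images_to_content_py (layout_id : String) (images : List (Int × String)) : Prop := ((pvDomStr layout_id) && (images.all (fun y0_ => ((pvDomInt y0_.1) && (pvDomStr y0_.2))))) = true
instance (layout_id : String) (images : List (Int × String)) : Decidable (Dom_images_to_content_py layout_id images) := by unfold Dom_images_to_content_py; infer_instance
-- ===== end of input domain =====

-- B builds the content list by gathering (map over positions reading the dict) instead of
-- scattering dict items into a pre-sized mutable list; objective: simpler.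

-- ===== PORT A =====
-- loop body of A's 'for area_id, path in images.items()' (kept as a helper)
def imgStep (content : List String) (p : Int × String) : List String :=
  if p.1 ≤ 0 ∨ p.2 = "" then content
  else
    let index := p.1 - 1
    let content :=
      if (content.length : Int) ≤ index then
        content ++ (List.range (index + 1 - (content.length : Int)).toNat).map (fun _ => "")
      else content
    content.set index.toNat p.2

def images_to_content_py (layout_id : String) (images : List (Int × String)) : List String :=
  let d := PySem.Dict.ofList images
  if d.items.isEmpty then []
  else
    let max_area : Int := PySem.List.maxD (d.keys.filter (fun k => decide (0 < k))) id 0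
    if max_area ≤ 0 then []
    else
      let content := (List.range max_area.toNat).map (fun _ => "")
      d.items.foldl imgStep content

-- ===== PORT B =====
def images_to_content_py_alt (layout_id : String) (images : List (Int × String)) : List String :=
  let d := PySem.Dict.ofList images
  if d.items.isEmpty then []
  else
    let max_area : Int := PySem.List.maxD (d.keys.filter (fun k => decide (0 < k))) id 0
    if max_area ≤ 0 then []
    else (PySem.List.pyRange 1 (max_area + 1) 1).map (fun i => d.getD i "")

-- ===== PRECONDITION & SPEC =====
def Spec_images_to_content_py (layout_id : String) (images : List (Int × String)) (out : List String) : Prop := out = images_to_content_py_alt layout_id images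
instance (layout_id : String) (images : List (Int × String)) (out : List String) : Decidable (Spec_images_to_content_py layout_id images out) := by unfold Spec_images_to_content_py; infer_instance

-- ===== CLAIM (what is proved, stated in full; the proofs are below) =====
def Claim_equal_images_to_content_py : Prop := ∀ (layout_id : String) (images : List (Int × String)), Dom_images_to_content_py layout_id images → Spec_images_to_content_py layout_id images (images_to_content_py layout_id images)

-- ===== LEMMAS AND PROOFS =====

-- the scatter loop over a nodup-keyed item list, characterised pointwise as a gather
lemma scatter_eq (l : List (Int × String)) (c : List String)
    (hb : ∀ p ∈ l, 0 < p.1 → p.1 ≤ (c.length : Int))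
    (hnd : (l.map Prod.fst).Nodup) :
    l.foldl imgStep c = (List.range c.length).map (fun (j : Nat) =>
      match l.find? (fun p => p.1 == 1 + (j : Int)) with
      | some p => if p.2 = "" then c.getD j "" else p.2
      | none => c.getD j "") := by
  induction l generalizing c with
  | nil =>
    simp [List.find?]
    apply List.ext_getElem
    · simp
    · intro i h1 h2
      simp at h1
      simp [List.getD_eq_getElem?_getD, List.getElem?_eq_getElem h1]
  | cons p rest ih =>
    obtain ⟨k, v⟩ := p
    simp only [List.map_cons, List.nodup_cons] at hnd
    by_cases hskip : k ≤ 0 ∨ v = ""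
    · rw [List.foldl_cons]
      rw [show imgStep c (k, v) = c by simp [imgStep, hskip]]
      rw [ih c (fun p hp h0 => hb p (List.mem_cons_of_mem _ hp) h0) hnd.2]
      apply List.map_congr_left
      intro j hj
      simp only [List.mem_range] at hj
      rcases hskip with hk | hv
      · rw [List.find?_cons_of_neg]
        simp only [beq_iff_eq]
        omega
      · by_cases hkj : k = 1 + (j : Int)
        · rw [List.find?_cons_of_pos (by simp [hkj])]
          have : rest.find? (fun p => p.1 == 1 + (j : Int)) = none := by
            rw [List.find?_eq_none]
            intro x hx
            simp only [beq_iff_eq]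
            intro he
            exact hnd.1 (by rw [hkj, ← he]; exact List.mem_map_of_mem hx)
          simp [this, hv]
        · rw [List.find?_cons_of_neg (by simp [hkj])]
    · push_neg at hskip
      obtain ⟨hk0, hv⟩ := hskip
      have hk0' : 0 < k := by omega
      have hkle : k ≤ (c.length : Int) := hb (k, v) List.mem_cons_self hk0'
      have hstep : imgStep c (k, v) = c.set (k - 1).toNat v := by
        simp only [imgStep]
        rw [if_neg (by rw [not_or]; exact ⟨by omega, hv⟩), if_neg (by omega)]
      rw [List.foldl_cons, hstep]
      have hlen : (c.set (k - 1).toNat v).length = c.length := by simp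
      rw [ih _ (by rw [hlen]; exact fun p hp h0 => hb p (List.mem_cons_of_mem _ hp) h0) hnd.2,
          hlen]
      apply List.map_congr_left
      intro j hj
      simp only [List.mem_range] at hj
      have hrestnone : rest.find? (fun p => p.1 == k) = none := by
        rw [List.find?_eq_none]
        intro x hx
        simp only [beq_iff_eq]
        intro he
        exact hnd.1 (he ▸ (List.mem_map_of_mem hx))
      by_cases hkj : k = 1 + (j : Int)
      · rw [List.find?_cons_of_pos (by simp [hkj])]
        rw [show List.find? (fun p => p.1 == 1 + (j : Int)) rest = none from hkj ▸ hrestnone]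
        have hji : (k - 1).toNat = j := by omega
        simp [List.getD_eq_getElem?_getD, List.getElem?_set, hji, hj, hv]
      · rw [List.find?_cons_of_neg (by simp [hkj])]
        have hne : (k - 1).toNat ≠ j := by omega
        cases hfind : rest.find? (fun p => p.1 == 1 + (j : Int)) with
        | none =>
            have hne' : ¬(k.toNat - 1 = j) := by omega
            simp [List.getD_eq_getElem?_getD, List.getElem?_set, hne']
        | some q =>
            have hne' : ¬(k.toNat - 1 = j) := by omega
            simp [List.getD_eq_getElem?_getD, List.getElem?_set, hne']

-- ===== VERDICT (by name: the statement is the Claim_ definition above) =====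
theorem images_to_content_py_spec : Claim_equal_images_to_content_py := by
  intro layout_id images _
  unfold Spec_images_to_content_py
  unfold images_to_content_py images_to_content_py_alt
  simp only []
  set d := PySem.Dict.ofList images with hd
  by_cases h1 : d.items.isEmpty
  · simp [h1]
  · simp only [h1, Bool.false_eq_true, if_false]
    set M := PySem.List.maxD (d.keys.filter (fun k => decide (0 < k))) id 0 with hM
    by_cases h2 : M ≤ 0
    · simp [h2]
    · rw [if_neg h2, if_neg h2]
      push_neg at h2
      have hclen : ((List.range M.toNat).map (fun _ => "")).length = M.toNat := by simp
      have hb : ∀ p ∈ d.items, 0 < p.1 →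
          p.1 ≤ (((List.range M.toNat).map (fun _ => "")).length : Int) := by
        intro p hp hp0
        rw [hclen]
        have hmem : p.1 ∈ d.keys.filter (fun k => decide (0 < k)) := by
          rw [List.mem_filter]
          exact ⟨List.mem_map_of_mem hp, by simpa using hp0⟩
        have : p.1 ≤ M := by
          rw [hM]
          unfold PySem.List.maxD
          cases hmx : PySem.List.max? (d.keys.filter (fun k => decide (0 < k))) id with
          | none =>
            rw [PySem.List.max?_eq_none_iff] at hmx
            simp [hmx] at hmem
          | some m =>
            simpa using PySem.List.max?_isMax hmx p.1 hmem
        omega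
      have hnd : (d.items.map Prod.fst).Nodup := PySem.Dict.nodup_keys_ofList images
      rw [scatter_eq d.items _ hb hnd, hclen]
      have hrange : PySem.List.pyRange 1 (M + 1) 1 =
          (List.range M.toNat).map (fun (k : Nat) => 1 + (k : Int)) := by
        unfold PySem.List.pyRange
        rw [if_neg (by norm_num)]
        simp only [show (0:Int) < 1 from by norm_num, if_true]
        rw [if_pos (by omega)]
        norm_num
      rw [hrange, List.map_map]
      apply List.map_congr_left
      intro j hj
      simp only [List.mem_range] at hj
      have hc0 : ((List.range M.toNat).map (fun _ => "")).getD j "" = "" := by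
        simp [List.getD_eq_getElem?_getD, List.getElem?_map]
      have hget : d.getD (1 + (j : Int)) "" =
          ((d.items.find? (fun p => p.1 == 1 + (j : Int))).map Prod.snd).getD "" := by
        rw [PySem.Dict.getD_eq_get?_getD]
        rfl
      simp only [Function.comp]
      rw [hget]
      cases hfind : d.items.find? (fun p => p.1 == 1 + (j : Int)) with
      | none => simp [hc0]
      | some p =>
        by_cases hp2 : p.2 = ""
        · simp [hp2, hc0]
        · simp [hp2]
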